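-- pv_equiv track=rewrite | github.com/RoguePiranha/word_game | words/clean_inflections.py | looks_latin
-- ===== SOURCE A (Python) =====
-- LATIN_SUFFIXES = (
--     "ae", "ii", "orum", "arum", "idae", "iscus", "ensis", "rix", "um", "us", "ix", "ex"
-- )
--
-- ALLOW_LATIN = {
--     # -us / -um common in English
--     "bonus","focus","status","virus","campus","apparatus",
--     "album","forum","museum","stadium","premium","vacuum","minimum","maximum","medium","platinum",
--     "momentum","quantum","spectrum",
--     "fungus","census","thesaurus",
--     # -ix that are mainstream English
--     "matrix","prefix","suffix","affix","helix","remix","appendix","phoenix",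
--     # -ae that are mainstream
--     "algae","larvae",
-- }
--
-- def looks_latin(w: str) -> bool:
--     if w in ALLOW_LATIN:
--         return False
--     # strong Latin-y endings
--     for suf in LATIN_SUFFIXES:
--         if w.endswith(suf):
--             # relax for very short words like "bus", "gas", etc.
--             if suf in ("us","um","ix","ex") and len(w) <= 4:
--                 return False
--             return True
--     return False
-- ===== SOURCE B (Python) =====
-- ALLOW_LATIN = {
--     "bonus","focus","status","virus","campus","apparatus",
--     "album","forum","museum","stadium","premium","vacuum","minimum","maximum","medium","platinum",
--     "momentum","quantum","spectrum",
--     "fungus","census","thesaurus",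
--     "matrix","prefix","suffix","affix","helix","remix","appendix","phoenix",
--     "algae","larvae",
-- }
--
-- def looks_latin(w: str) -> bool:
--     # Decision tree over the word read backwards: no suffix list, no endswith.
--     if w in ALLOW_LATIN:
--         return False
--     r = w[::-1]
--     n = len(r)
--
--     def c(i):
--         return r[i] if i < n else ""
--
--     long_enough = n > 4
--     a = c(0)
--     if a == "e":                      # ...ae (covers -idae too)
--         return c(1) == "a"
--     if a == "i":                      # ...ii
--         return c(1) == "i"
--     if a == "m":                      # ...um / ...orum / ...arum
--         if c(1) != "u":
--             return False
--         return (c(2) == "r" and c(3) in ("o", "a")) or long_enough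
--     if a == "s":                      # ...us / ...iscus / ...ensis
--         if c(1) == "u":
--             return (c(2) == "c" and c(3) == "s" and c(4) == "i") or long_enough
--         if c(1) == "i":
--             return c(2) == "s" and c(3) == "n" and c(4) == "e"
--         return False
--     if a == "x":                      # ...ix / ...rix / ...ex
--         if c(1) == "i":
--             return c(2) == "r" or long_enough
--         if c(1) == "e":
--             return long_enough
--         return False
--     return False
-- ===== Notes on version B (the rewrite author's own statement) =====
-- stated objective: alternative
-- what changed: Replaces the ordered endswith loop over a suffix tuple by a hand-built decision tree that reads the word backwards character by character (no suffix list, no endswith), merging the length relaxation into the tree's leaves.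
import Mathlib
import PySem

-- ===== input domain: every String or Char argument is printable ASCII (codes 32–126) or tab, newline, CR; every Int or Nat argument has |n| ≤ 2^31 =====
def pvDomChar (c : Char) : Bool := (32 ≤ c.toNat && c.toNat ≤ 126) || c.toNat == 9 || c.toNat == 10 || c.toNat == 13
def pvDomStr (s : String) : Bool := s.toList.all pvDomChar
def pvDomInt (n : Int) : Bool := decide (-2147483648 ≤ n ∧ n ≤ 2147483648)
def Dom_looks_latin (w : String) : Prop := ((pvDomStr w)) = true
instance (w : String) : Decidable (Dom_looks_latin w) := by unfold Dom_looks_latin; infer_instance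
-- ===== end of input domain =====

-- B replaces A's ordered endswith loop over a suffix list by a hand-built decision
-- tree over the word read backwards (no suffix list, no endswith); objective: alternative.

-- ===== PORT A =====
def LATIN_SUFFIXES : List String :=
  ["ae", "ii", "orum", "arum", "idae", "iscus", "ensis", "rix", "um", "us", "ix", "ex"]

def ALLOW_LATIN : PySem.Set String := PySem.Set.ofList
  ["bonus","focus","status","virus","campus","apparatus",
   "album","forum","museum","stadium","premium","vacuum","minimum","maximum","medium","platinum",
   "momentum","quantum","spectrum",
   "fungus","census","thesaurus",
   "matrix","prefix","suffix","affix","helix","remix","appendix","phoenix",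
   "algae","larvae"]

-- the 'for suf in LATIN_SUFFIXES: …' loop with its early returns
def looksLatinLoop (w : String) : List String → Bool
  | [] => false
  | suf :: rest =>
    if PySem.Str.endswith w suf then
      if suf ∈ (["us", "um", "ix", "ex"] : List String) ∧ PySem.Str.len w ≤ 4 then
        false
      else
        true
    else looksLatinLoop w rest

def looks_latin (w : String) : Bool :=
  if PySem.Set.contains ALLOW_LATIN w then false
  else looksLatinLoop w LATIN_SUFFIXES

-- ===== PORT B =====
-- 'c(i) = r[i] if i < n else ""' : safe indexing into the reversed word; the Python
-- sentinel "" never equals a one-char string, exactly as `none` never equals `some _`.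
def revAt (r : List Char) (i : Nat) : Option Char := r[i]?

-- the decision tree over the reversed word (r = reversed w)
def latinTree (r : List Char) : Bool :=
  let c := revAt r
  let longEnough : Bool := decide (4 < r.length)
  if c 0 == some 'e' then c 1 == some 'a'
  else if c 0 == some 'i' then c 1 == some 'i'
  else if c 0 == some 'm' then
    if c 1 != some 'u' then false
    else (c 2 == some 'r' && (c 3 == some 'o' || c 3 == some 'a')) || longEnough
  else if c 0 == some 's' then
    if c 1 == some 'u' then (c 2 == some 'c' && c 3 == some 's' && c 4 == some 'i') || longEnough
    else if c 1 == some 'i' then c 2 == some 's' && c 3 == some 'n' && c 4 == some 'e'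
    else false
  else if c 0 == some 'x' then
    if c 1 == some 'i' then c 2 == some 'r' || longEnough
    else if c 1 == some 'e' then longEnough
    else false
  else false

def looks_latin_alt (w : String) : Bool :=
  if PySem.Set.contains ALLOW_LATIN w then false
  else latinTree w.toList.reverse

-- ===== PRECONDITION & SPEC =====
def Spec_looks_latin (w : String) (out : Bool) : Prop := out = looks_latin_alt w
instance (w : String) (out : Bool) : Decidable (Spec_looks_latin w out) := by unfold Spec_looks_latin; infer_instance

-- ===== CLAIM =====
def Claim_equal_looks_latin : Prop := ∀ (w : String), Dom_looks_latin w → Spec_looks_latin w (looks_latin w)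

-- ===== LEMMAS AND PROOFS =====

theorem endswith_eq_rev_prefix (w s : String) :
    PySem.Str.endswith w s = (s.toList.reverse).isPrefixOf (w.toList.reverse) := by
  rw [Bool.eq_iff_iff]
  simp [PySem.Chars.endswith_iff, List.isPrefixOf_iff_prefix, List.reverse_prefix]

theorem charBeq (a b : Char) : (a == b) = decide (a = b) := by
  rw [Bool.eq_iff_iff]; simp

theorem loop_eq_tree (w : String) :
    looksLatinLoop w LATIN_SUFFIXES = latinTree w.toList.reverse := by
  have hlen : PySem.Str.len w = (w.toList.reverse).length := by
    simp [PySem.Str.len_eq]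
  simp only [LATIN_SUFFIXES, looksLatinLoop, endswith_eq_rev_prefix, hlen]
  generalize w.toList.reverse = l
  rcases l with _ | ⟨a, _ | ⟨b, _ | ⟨c, _ | ⟨d, _ | ⟨e, t⟩⟩⟩⟩⟩ <;>
    simp only [latinTree, revAt] <;>
    simp [List.isPrefixOf] <;>
    split_ifs <;>
    simp_all [charBeq, @eq_comm Char, Bool.and_or_distrib_left, Bool.and_assoc] <;>
    try (first | (right; right; omega) | (right; omega))
  all_goals (by_cases hx : a = 'x' <;> by_cases hb : b = 'e' <;> simp_all <;> try omega)

-- ===== VERDICT =====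
theorem looks_latin_spec : Claim_equal_looks_latin := by
  intro w _
  unfold Spec_looks_latin looks_latin looks_latin_alt
  rw [loop_eq_tree]
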